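-- pv_equiv track=rewrite | github.com/SoxSavant/customizable-savant-page-creator | teamapp.py | get_team_nickname
-- ===== SOURCE A (Python) =====
-- def get_team_nickname(full_name: str) -> str:
--     """Return nickname portion for logo lookup, handling multi-word cities."""
--     multi_word_cities = {
--         "Kansas City", "Los Angeles", "New York", "San Diego",
--         "San Francisco", "St. Louis", "Tampa Bay"
--     }
--     for city in multi_word_cities:
--         prefix = f"{city} "
--         if full_name.startswith(prefix):
--             return full_name[len(prefix):]
--     return full_name.split(" ", 1)[-1]
-- ===== SOURCE B (Python) =====
-- def get_team_nickname(full_name: str) -> str: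
--     """Return nickname portion for logo lookup, handling multi-word cities."""
--     city_second = {
--         "Kansas": ("City",), "Los": ("Angeles",), "New": ("York",),
--         "San": ("Diego", "Francisco"), "St.": ("Louis",), "Tampa": ("Bay",),
--     }
--     i = full_name.find(" ")
--     if i == -1:
--         return full_name
--     j = full_name.find(" ", i + 1)
--     if j != -1 and full_name[i + 1:j] in city_second.get(full_name[:i], ()):
--         return full_name[j + 1:]
--     return full_name[i + 1:]
-- ===== Notes on version B (the rewrite author's own statement) =====
-- stated objective: alternative
-- what changed: Replaces A's loop of seven startswith prefix tests (slicing off the matched prefix) by an index-based single scan: locate the first two spaces with find, look the first word up in a dict mapping it to its possible second city words, and slice the nickname off at the chosen space.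
import Mathlib
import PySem

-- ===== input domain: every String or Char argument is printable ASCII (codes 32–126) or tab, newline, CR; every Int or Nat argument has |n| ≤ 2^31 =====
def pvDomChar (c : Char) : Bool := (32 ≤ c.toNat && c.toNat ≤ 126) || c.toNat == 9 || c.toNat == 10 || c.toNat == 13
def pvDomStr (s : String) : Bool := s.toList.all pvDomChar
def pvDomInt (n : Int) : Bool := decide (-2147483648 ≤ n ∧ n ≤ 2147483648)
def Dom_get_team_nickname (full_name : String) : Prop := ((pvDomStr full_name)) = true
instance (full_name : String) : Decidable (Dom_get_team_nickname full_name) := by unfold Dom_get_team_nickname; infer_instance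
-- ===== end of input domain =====

-- B replaces A's seven-prefix startswith scan by an index-based scan: find the first two
-- spaces, look the first word up in a dict of possible second city words, and slice at
-- the chosen space (objective: alternative).

-- ===== PORT A =====
-- the set literal of multi-word cities, in source order (the prefixes are mutually
-- exclusive, so Python's set-iteration order cannot affect the result)
def pvCities : List String :=
  PySem.Set.ofList ["Kansas City", "Los Angeles", "New York", "San Diego",
                    "San Francisco", "St. Louis", "Tampa Bay"]

-- the 'for city in multi_word_cities' loop: first matching prefix returns the slice
def pvALoop (full_name : String) : List String → Option String
  | [] => none
  | city :: rest =>
    let pref := city ++ " "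
    if PySem.Str.startswith full_name pref then
      some (PySem.Str.slice full_name (some (PySem.Str.len pref)) none)
    else pvALoop full_name rest

def get_team_nickname (full_name : String) : String :=
  match pvALoop full_name pvCities with
  | some r => r
  | none =>
    -- full_name.split(" ", 1)[-1]; split always returns a nonempty list, so [-1] never raises
    ((PySem.List.pyGet? ((PySem.Str.splitMax? full_name " " 1).getD []) (-1)).getD "")

-- ===== PORT B =====
-- the dict literal city_second: first city word ↦ tuple of possible second words
def pvCityDict : PySem.Dict String (List String) :=
  ⟨[("Kansas", ["City"]), ("Los", ["Angeles"]), ("New", ["York"]),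
    ("San", ["Diego", "Francisco"]), ("St.", ["Louis"]), ("Tampa", ["Bay"])]⟩

def get_team_nickname_alt (full_name : String) : String :=
  let i := PySem.Str.find full_name " "
  if i = -1 then full_name
  else
    let j := PySem.Str.findFrom full_name " " (i + 1)
    if j ≠ -1 ∧ (pvCityDict.getD (PySem.Str.slice full_name none (some i)) []).contains
        (PySem.Str.slice full_name (some (i + 1)) (some j)) = true then
      PySem.Str.slice full_name (some (j + 1)) none
    else
      PySem.Str.slice full_name (some (i + 1)) none

-- ===== PRECONDITION & SPEC =====
def Spec_get_team_nickname (full_name : String) (out : String) : Prop := out = get_team_nickname_alt full_name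
instance (full_name : String) (out : String) : Decidable (Spec_get_team_nickname full_name out) := by unfold Spec_get_team_nickname; infer_instance

-- ===== CLAIM (what is proved, stated in full; the proofs are below) =====
def Claim_equal_get_team_nickname : Prop := ∀ (full_name : String), Dom_get_team_nickname full_name → Spec_get_team_nickname full_name (get_team_nickname full_name)

-- ===== LEMMAS AND PROOFS =====

-- "is not a space": the predicate characterising words
def pvP (c : Char) : Bool := c != ' '

-- find.go on sub = [' '] returns k + index of the first space, or -1
theorem pv_findgo (L : List Char) : ∀ (k : Nat),
    PySem.Chars.find.go [' '] L k =
      if ' ' ∈ L then ((k + (L.takeWhile pvP).length : Nat) : Int) else -1 := by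
  induction L with
  | nil => intro k; simp [PySem.Chars.find.go]
  | cons c t ih =>
    intro k
    by_cases hc : c = ' '
    · subst hc
      simp [PySem.Chars.find.go, List.isPrefixOf, List.takeWhile, pvP]
    · have hb : pvP c = true := by simp [pvP, hc]
      simp only [PySem.Chars.find.go, List.isPrefixOf, List.takeWhile_cons_of_pos hb,
        List.mem_cons]
      rw [if_neg (by simp [Ne.symm hc])]
      rw [ih (k + 1)]
      by_cases hm : ' ' ∈ t
      · simp [hm, Ne.symm hc]; omega
      · simp [hm, Ne.symm hc]

-- find on [' '] characterised: index of the first space, -1 if none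
theorem pv_find (L : List Char) :
    PySem.Chars.find L [' '] =
      if ' ' ∈ L then (((L.takeWhile pvP).length : Nat) : Int) else -1 := by
  rw [PySem.Chars.find, pv_findgo]; simp

-- budget 0: the whole remainder becomes the final part
theorem pv_go0 (fuel : Nat) (l cur : List Char) (acc : List (List Char)) :
    PySem.Chars.splitOnMax.go [' '] fuel 0 l cur acc = acc.reverse ++ [cur.reverse ++ l] := by
  cases fuel <;> cases l <;> simp [PySem.Chars.splitOnMax.go]

-- budget 1: split off the first word, remainder is the last part
theorem pv_go1 (l : List Char) : ∀ (fuel : Nat), l.length ≤ fuel → ∀ (cur : List Char) (acc : List (List Char)),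
    PySem.Chars.splitOnMax.go [' '] fuel 1 l cur acc =
      acc.reverse ++ (if ' ' ∈ l then
        [cur.reverse ++ l.takeWhile pvP, (l.dropWhile pvP).tail]
      else [cur.reverse ++ l]) := by
  induction l with
  | nil =>
    intro fuel _ cur acc
    cases fuel <;> simp [PySem.Chars.splitOnMax.go]
  | cons c rest ih =>
    intro fuel hlen cur acc
    cases fuel with
    | zero => simp at hlen
    | succ f =>
      by_cases hc : c = ' '
      · subst hc
        simp [PySem.Chars.splitOnMax.go, List.isPrefixOf, pv_go0, pvP, List.takeWhile, List.dropWhile]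
      · have hlen' : rest.length ≤ f := by simp at hlen; omega
        have hb : pvP c = true := by simp [pvP, hc]
        simp [PySem.Chars.splitOnMax.go, List.isPrefixOf, ih f hlen',
              List.takeWhile_cons_of_pos hb, List.dropWhile_cons_of_pos hb, List.mem_cons]
        by_cases hm : ' ' ∈ rest <;> simp [hm, Ne.symm hc]

-- splitOnMax with maxsplit 1, characterised
theorem pv_split1 (L : List Char) :
    PySem.Chars.splitOnMax L [' '] 1 =
      if ' ' ∈ L then [L.takeWhile pvP, (L.dropWhile pvP).tail] else [L] := by
  rw [PySem.Chars.splitOnMax, if_neg (by norm_num : ¬ (1:Int) < 0),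
      show ((1:Int)).toNat = 1 from rfl, pv_go1 L (L.length + 1) (by omega)]
  split <;> simp

-- split(" ", 1) on the string level
theorem pv_parts1 (s : String) :
    (PySem.Str.splitMax? s " " 1).getD [] =
      (if ' ' ∈ s.toList then
        [s.toList.takeWhile pvP, (s.toList.dropWhile pvP).tail]
      else [s.toList]).map String.ofList := by
  have hsep : (" " : String).toList = [' '] := rfl
  simp [PySem.Str.splitMax?, PySem.Chars.splitMax?, hsep, pv_split1]

-- a space-free word followed by ' ' is exactly what takeWhile/dropWhile split off
theorem pv_word (X : List Char) (t : List Char) (h : X.all pvP = true) :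
    (X ++ ' ' :: t).takeWhile pvP = X ∧ (X ++ ' ' :: t).dropWhile pvP = ' ' :: t := by
  induction X with
  | nil => simp [pvP]
  | cons c rest ih =>
    rw [List.all_cons, Bool.and_eq_true] at h
    have := ih h.2
    simp [List.takeWhile_cons_of_pos h.1, List.dropWhile_cons_of_pos h.1, this.1, this.2]

-- a char list containing a space decomposes as word ++ ' ' :: rest
theorem pv_decomp (L : List Char) (h : ' ' ∈ L) :
    L = L.takeWhile pvP ++ ' ' :: (L.dropWhile pvP).tail := by
  induction L with
  | nil => simp at h
  | cons c rest ih =>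
    by_cases hc : c = ' '
    · subst hc; simp [List.takeWhile, List.dropWhile, pvP]
    · have hm : ' ' ∈ rest := by rcases List.mem_cons.mp h with h | h; exact absurd h.symm hc; exact h
      have hb : pvP c = true := by simp [pvP, hc]
      rw [List.takeWhile_cons_of_pos hb, List.dropWhile_cons_of_pos hb, List.cons_append]
      exact congrArg (c :: ·) (ih hm)

-- if s = w1 ++ ' ' ++ w2 ++ ' ' ++ r then s starts with "w1 w2 "
theorem pv_sw (s : String) (w1 w2 r : List Char)
    (h1 : s.toList = w1 ++ ' ' :: (w2 ++ ' ' :: r)) (c : String)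
    (hkey : String.ofList w1 ++ " " ++ String.ofList w2 = c) :
    PySem.Str.startswith s (c ++ " ") = true := by
  have hct : c.toList = w1 ++ ' ' :: w2 := by rw [← hkey]; simp
  rw [PySem.Str.startswith, PySem.Chars.startswith_iff]
  refine ⟨r, ?_⟩
  simp [hct, h1]

-- evaluating A's slice full_name[len(pre):] when pre is a prefix
theorem pv_sliceA (s : String) (pre : String) (t : List Char) (hs : s.toList = pre.toList ++ t) :
    PySem.Str.slice s (some (PySem.Str.len pre)) none = String.ofList t := by
  rw [PySem.Str.slice, PySem.Str.len, PySem.Chars.slice, PySem.List.slice_from_natCast, hs,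
      List.drop_left]

-- the dict lookup hitting means the reconstructed two-word city is listed
theorem pv_dict_imp (w1 w2 : String)
    (h : (pvCityDict.getD w1 []).contains w2 = true) :
    w1 ++ " " ++ w2 ∈ pvCities := by
  by_cases h1 : w1 = "Kansas"
  · subst h1; simp [pvCityDict, PySem.Dict.getD, PySem.Dict.get?] at h
    subst h; decide
  by_cases h2 : w1 = "Los"
  · subst h2; simp [pvCityDict, PySem.Dict.getD, PySem.Dict.get?] at h
    subst h; decide
  by_cases h3 : w1 = "New"
  · subst h3; simp [pvCityDict, PySem.Dict.getD, PySem.Dict.get?] at h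
    subst h; decide
  by_cases h4 : w1 = "San"
  · subst h4; simp [pvCityDict, PySem.Dict.getD, PySem.Dict.get?] at h
    rcases h with rfl | rfl <;> decide
  by_cases h5 : w1 = "St."
  · subst h5; simp [pvCityDict, PySem.Dict.getD, PySem.Dict.get?] at h
    subst h; decide
  by_cases h6 : w1 = "Tampa"
  · subst h6; simp [pvCityDict, PySem.Dict.getD, PySem.Dict.get?] at h
    subst h; decide
  · exfalso
    have e1 : (("Kansas":String) == w1) = false := by simp [Ne.symm h1]
    have e2 : (("Los":String) == w1) = false := by simp [Ne.symm h2]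
    have e3 : (("New":String) == w1) = false := by simp [Ne.symm h3]
    have e4 : (("San":String) == w1) = false := by simp [Ne.symm h4]
    have e5 : (("St.":String) == w1) = false := by simp [Ne.symm h5]
    have e6 : (("Tampa":String) == w1) = false := by simp [Ne.symm h6]
    simp [pvCityDict, PySem.Dict.getD, PySem.Dict.get?, List.find?,
          e1, e2, e3, e4, e5, e6] at h

-- B's value when the input is X ++ " " ++ Y ++ " " ++ t and Y is listed under X
theorem pv_B_pos (s X Y : String) (t : List Char)
    (hX : X.toList.all pvP = true) (hY : Y.toList.all pvP = true)
    (hs : s.toList = X.toList ++ ' ' :: (Y.toList ++ ' ' :: t))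
    (hmem : (pvCityDict.getD X []).contains Y = true) :
    get_team_nickname_alt s = String.ofList t := by
  have hw1 := pv_word X.toList (Y.toList ++ ' ' :: t) hX
  have hw2 := pv_word Y.toList t hY
  have hfind : PySem.Str.find s " " = (X.toList.length : Int) := by
    rw [PySem.Str.find_eq, show (" ":String).toList = [' '] from rfl, pv_find, hs,
        if_pos (by simp), hw1.1]
  have hsplit : s.toList = (X.toList ++ [' ']) ++ (Y.toList ++ ' ' :: t) := by
    rw [hs]; simp
  have hdrop1 : s.toList.drop (X.toList.length + 1) = Y.toList ++ ' ' :: t := by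
    rw [hsplit, show X.toList.length + 1 = (X.toList ++ [' ']).length by simp, List.drop_left]
  have hlen : X.toList.length + 1 ≤ s.toList.length := by
    rw [hs]; simp
  have hffrom : PySem.Str.findFrom s " " ((X.toList.length : Int) + 1) =
      ((X.toList.length + 1 + Y.toList.length : Nat) : Int) := by
    rw [PySem.Str.findFrom_eq, show (" ":String).toList = [' '] from rfl,
        show ((X.toList.length : Int) + 1) = ((X.toList.length + 1 : Nat) : Int) by omega,
        PySem.Chars.findFrom_natCast _ _ _ hlen, hdrop1, pv_find,
        if_pos (show ' ' ∈ Y.toList ++ ' ' :: t by simp), hw2.1, if_neg (by omega)]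
    omega
  have hslice0 : PySem.Str.slice s none (some ((X.toList.length : Nat) : Int)) = X := by
    rw [PySem.Str.slice.eq_1, PySem.Chars.slice_eq_listSlice,
        PySem.List.slice_to _ (by positivity), Int.toNat_natCast, hs, List.take_left']
    · exact String.ofList_toList
    · rfl
  have hslice12 : PySem.Str.slice s (some ((X.toList.length : Int) + 1))
      (some (((X.toList.length + 1 + Y.toList.length : Nat) : Int))) = Y := by
    rw [PySem.Str.slice.eq_1, PySem.Chars.slice_eq_listSlice,
        show ((X.toList.length : Int) + 1) = ((X.toList.length + 1 : Nat) : Int) by omega,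
        PySem.List.slice_natCast, hdrop1,
        show X.toList.length + 1 + Y.toList.length - (X.toList.length + 1) = Y.toList.length by omega,
        List.take_left']
    · exact String.ofList_toList
    · rfl
  have hdrop2 : s.toList.drop (X.toList.length + 1 + Y.toList.length + 1) = t := by
    rw [show s.toList = (X.toList ++ ' ' :: Y.toList ++ [' ']) ++ t by rw [hs]; simp,
        show X.toList.length + 1 + Y.toList.length + 1 = (X.toList ++ ' ' :: Y.toList ++ [' ']).length by simp; omega,
        List.drop_left]
  have hslice3 : PySem.Str.slice s (some (((X.toList.length + 1 + Y.toList.length : Nat) : Int) + 1)) none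
      = String.ofList t := by
    rw [PySem.Str.slice.eq_1, PySem.Chars.slice_eq_listSlice,
        show (((X.toList.length + 1 + Y.toList.length : Nat) : Int) + 1) = ((X.toList.length + 1 + Y.toList.length + 1 : Nat) : Int) by omega,
        PySem.List.slice_from _ (by positivity), Int.toNat_natCast, hdrop2]
  rw [get_team_nickname_alt]
  simp only [hfind]
  rw [if_neg (by omega)]
  simp only [hffrom, hslice12]
  rw [if_pos ⟨by omega, by rw [show ((X.toList.length : Int)) = ((X.toList.length : Nat) : Int) by rfl, hslice0]; exact hmem⟩]
  exact hslice3

-- when no listed city prefix matches, B falls through to full_name[i+1:] = split(" ",1)[-1]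
theorem pv_neg (s : String) (hn : ∀ c ∈ pvCities, PySem.Str.startswith s (c ++ " ") = false) :
    get_team_nickname_alt s =
      ((PySem.List.pyGet? ((PySem.Str.splitMax? s " " 1).getD []) (-1)).getD "") := by
  by_cases hm1 : ' ' ∈ s.toList
  · set tk := s.toList.takeWhile pvP with htk
    set r := (s.toList.dropWhile pvP).tail with hr
    have hdec : s.toList = tk ++ ' ' :: r := pv_decomp s.toList hm1
    have hfind : PySem.Str.find s " " = (tk.length : Int) := by
      rw [PySem.Str.find_eq, show (" ":String).toList = [' '] from rfl, pv_find, if_pos hm1, htk]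
    have hlen : tk.length + 1 ≤ s.toList.length := by
      rw [hdec]; simp
    have hdrop1 : s.toList.drop (tk.length + 1) = r := by
      rw [hdec, show tk.length + 1 = (tk ++ [' ']).length by simp,
          show tk ++ ' ' :: r = (tk ++ [' ']) ++ r by simp, List.drop_left]
    have hfall : ((PySem.List.pyGet? ((PySem.Str.splitMax? s " " 1).getD []) (-1)).getD "")
        = String.ofList r := by
      rw [pv_parts1, if_pos hm1]
      simp [PySem.List.pyGet?, PySem.List.pyIdx?]
      rw [← hr]
    have hslice1 : PySem.Str.slice s (some ((tk.length : Int) + 1)) none = String.ofList r := by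
      rw [PySem.Str.slice.eq_1, PySem.Chars.slice_eq_listSlice,
          show ((tk.length : Int) + 1) = ((tk.length + 1 : Nat) : Int) by omega,
          PySem.List.slice_from _ (by positivity), Int.toNat_natCast, hdrop1]
    rw [get_team_nickname_alt]
    simp only [hfind]
    rw [if_neg (by omega)]
    by_cases hm2 : ' ' ∈ r
    · set tk2 := r.takeWhile pvP with htk2
      set r2 := (r.dropWhile pvP).tail with hr2
      have hdec2 : r = tk2 ++ ' ' :: r2 := pv_decomp r hm2
      have hffrom : PySem.Str.findFrom s " " ((tk.length : Int) + 1) =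
          ((tk.length + 1 + tk2.length : Nat) : Int) := by
        rw [PySem.Str.findFrom_eq, show (" ":String).toList = [' '] from rfl,
            show ((tk.length : Int) + 1) = ((tk.length + 1 : Nat) : Int) by omega,
            PySem.Chars.findFrom_natCast _ _ _ hlen, hdrop1, pv_find, if_pos hm2, ← htk2,
            if_neg (by omega)]
        omega
      have hslice0 : PySem.Str.slice s none (some ((tk.length : Nat) : Int)) = String.ofList tk := by
        rw [PySem.Str.slice.eq_1, PySem.Chars.slice_eq_listSlice,
            PySem.List.slice_to _ (by positivity), Int.toNat_natCast, hdec,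
            show tk ++ ' ' :: r = tk ++ (' ' :: r) by rfl, List.take_left]
      have hslice12 : PySem.Str.slice s (some ((tk.length : Int) + 1))
          (some (((tk.length + 1 + tk2.length : Nat) : Int))) = String.ofList tk2 := by
        rw [PySem.Str.slice.eq_1, PySem.Chars.slice_eq_listSlice,
            show ((tk.length : Int) + 1) = ((tk.length + 1 : Nat) : Int) by omega,
            PySem.List.slice_natCast, hdrop1,
            show tk.length + 1 + tk2.length - (tk.length + 1) = tk2.length by omega,
            hdec2, show tk2 ++ ' ' :: r2 = tk2 ++ (' ' :: r2) by rfl, List.take_left]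
      have hnotmem : ¬ (pvCityDict.getD (String.ofList tk) []).contains (String.ofList tk2) = true := by
        intro hc
        have hcity := pv_dict_imp _ _ hc
        have hstart := pv_sw s tk tk2 r2 (by rw [hdec, hdec2]) _ rfl
        rw [hn _ hcity] at hstart
        exact Bool.false_ne_true hstart
      simp only [hffrom, hslice12]
      rw [if_neg (by
        intro hand
        exact hnotmem (by
          have := hand.2
          rwa [show ((tk.length : Int)) = ((tk.length : Nat) : Int) from rfl, hslice0] at this))]
      rw [hslice1, hfall]
    · have hffrom : PySem.Str.findFrom s " " ((tk.length : Int) + 1) = -1 := by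
        rw [PySem.Str.findFrom_eq, show (" ":String).toList = [' '] from rfl,
            show ((tk.length : Int) + 1) = ((tk.length + 1 : Nat) : Int) by omega,
            PySem.Chars.findFrom_natCast _ _ _ hlen, hdrop1, pv_find, if_neg hm2, if_pos rfl]
      simp only [hffrom]
      rw [if_neg (by intro hand; exact hand.1 rfl), hslice1, hfall]
  · have hfind : PySem.Str.find s " " = -1 := by
      rw [PySem.Str.find_eq, show (" ":String).toList = [' '] from rfl, pv_find, if_neg hm1]
    rw [get_team_nickname_alt]
    simp only [hfind]
    rw [if_pos trivial, pv_parts1, if_neg hm1]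
    simp [PySem.List.pyGet?, PySem.List.pyIdx?, String.ofList_toList]

-- A's value in a successful startswith branch equals B's value
theorem pv_pos_case (s cX cY c : String)
    (hc : cX ++ " " ++ cY = c)
    (hX : cX.toList.all pvP = true) (hY : cY.toList.all pvP = true)
    (hmem : (pvCityDict.getD cX []).contains cY = true)
    (h : PySem.Str.startswith s (c ++ " ") = true) :
    PySem.Str.slice s (some (PySem.Str.len (c ++ " "))) none = get_team_nickname_alt s := by
  rw [PySem.Str.startswith] at h
  obtain ⟨t, ht⟩ := (PySem.Chars.startswith_iff _ _).mp h
  have hs : s.toList = cX.toList ++ ' ' :: (cY.toList ++ ' ' :: t) := by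
    rw [← ht, ← hc]; simp
  rw [pv_sliceA s (c ++ " ") t ht.symm, pv_B_pos s cX cY t hX hY hs hmem]

-- the set literal evaluates to the plain list of the seven cities
theorem pv_cities_eq : pvCities = ["Kansas City", "Los Angeles", "New York", "San Diego",
    "San Francisco", "St. Louis", "Tampa Bay"] := by decide

-- ===== VERDICT (by name: the statement is the Claim_ definition above) =====
theorem get_team_nickname_spec : Claim_equal_get_team_nickname := by
  intro s _
  rw [Spec_get_team_nickname, get_team_nickname, pv_cities_eq]
  simp only [pvALoop]
  by_cases h1 : PySem.Str.startswith s ("Kansas City" ++ " ") = true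
  · simp only [h1, if_true]
    exact pv_pos_case s "Kansas" "City" "Kansas City" (by decide) (by decide) (by decide) (by decide) h1
  by_cases h2 : PySem.Str.startswith s ("Los Angeles" ++ " ") = true
  · simp only [h1, h2, if_true, Bool.false_eq_true, if_false]
    exact pv_pos_case s "Los" "Angeles" "Los Angeles" (by decide) (by decide) (by decide) (by decide) h2
  by_cases h3 : PySem.Str.startswith s ("New York" ++ " ") = true
  · simp only [h1, h2, h3, if_true, Bool.false_eq_true, if_false]
    exact pv_pos_case s "New" "York" "New York" (by decide) (by decide) (by decide) (by decide) h3
  by_cases h4 : PySem.Str.startswith s ("San Diego" ++ " ") = true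
  · simp only [h1, h2, h3, h4, if_true, Bool.false_eq_true, if_false]
    exact pv_pos_case s "San" "Diego" "San Diego" (by decide) (by decide) (by decide) (by decide) h4
  by_cases h5 : PySem.Str.startswith s ("San Francisco" ++ " ") = true
  · simp only [h1, h2, h3, h4, h5, if_true, Bool.false_eq_true, if_false]
    exact pv_pos_case s "San" "Francisco" "San Francisco" (by decide) (by decide) (by decide) (by decide) h5
  by_cases h6 : PySem.Str.startswith s ("St. Louis" ++ " ") = true
  · simp only [h1, h2, h3, h4, h5, h6, if_true, Bool.false_eq_true, if_false]
    exact pv_pos_case s "St." "Louis" "St. Louis" (by decide) (by decide) (by decide) (by decide) h6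
  by_cases h7 : PySem.Str.startswith s ("Tampa Bay" ++ " ") = true
  · simp only [h1, h2, h3, h4, h5, h6, h7, if_true, Bool.false_eq_true, if_false]
    exact pv_pos_case s "Tampa" "Bay" "Tampa Bay" (by decide) (by decide) (by decide) (by decide) h7
  · simp only [h1, h2, h3, h4, h5, h6, h7, Bool.false_eq_true, if_false]
    refine Eq.symm (pv_neg s ?_)
    intro c hc
    rw [pv_cities_eq] at hc
    simp only [List.mem_cons, List.not_mem_nil, or_false] at hc
    rcases hc with rfl | rfl | rfl | rfl | rfl | rfl | rfl
    · exact Bool.eq_false_iff.mpr h1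
    · exact Bool.eq_false_iff.mpr h2
    · exact Bool.eq_false_iff.mpr h3
    · exact Bool.eq_false_iff.mpr h4
    · exact Bool.eq_false_iff.mpr h5
    · exact Bool.eq_false_iff.mpr h6
    · exact Bool.eq_false_iff.mpr h7
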